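-- pv_equiv track=rewrite | github.com/naveen623/Competetive-Programming--2 | Day -11/01-nth_tidynumber-Python/nth_tidynumber.py | fun_nth_tidynumber
-- ===== SOURCE A (Python) =====
-- def istidy(n):
--     n = str(n)
--     x = sorted(list(map(int, n)))
--     oc = ""
--     for i in x:
--         oc += str(i)
--     return n == oc
--
-- def fun_nth_tidynumber(n):
--     c = -1
--     i = 1
--     while True:
--         if istidy(i):
--             c += 1
--             if c == n:
--                 return i
--         i += 1
-- ===== SOURCE B (Python) =====
-- def _next(r):
--     # r: digits of a tidy number, least-significant digit first; returns the next tidy number's digits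
--     if not r:
--         return [1]
--     if r[0] == 9:
--         e = _next(r[1:])
--         return [e[0]] + e
--     return [r[0] + 1] + r[1:]
--
-- def fun_nth_tidynumber(n):
--     r = [1]
--     for _ in range(n):
--         r = _next(r)
--     v = 0
--     for x in reversed(r):
--         v = v * 10 + x
--     return v
-- ===== Notes on version B (the rewrite author's own statement) =====
-- stated objective: faster
-- what changed: A scans every integer 1,2,3,... and tests each by sorting its digits until the n-th tidy one is found; B never tests candidates: it steps directly from each tidy number to the next via a digit-successor function on the digit list (bump the lowest non-9 digit and fill, or grow an all-ones list), so it touches only tidy numbers.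
import Mathlib
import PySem

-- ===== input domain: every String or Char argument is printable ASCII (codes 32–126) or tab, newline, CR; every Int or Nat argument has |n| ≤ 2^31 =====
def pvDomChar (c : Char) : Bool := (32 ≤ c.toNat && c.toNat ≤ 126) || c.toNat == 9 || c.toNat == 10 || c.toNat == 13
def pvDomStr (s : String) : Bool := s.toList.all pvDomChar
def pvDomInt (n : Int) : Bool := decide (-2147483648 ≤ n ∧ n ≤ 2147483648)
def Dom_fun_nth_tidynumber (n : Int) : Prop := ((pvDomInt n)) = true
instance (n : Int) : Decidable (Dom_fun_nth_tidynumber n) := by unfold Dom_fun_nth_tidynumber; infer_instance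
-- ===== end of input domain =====

-- B replaces A's scan over every integer (testing each by sort-of-digits) with direct generation of
-- successive tidy numbers via a digit-successor function: alternative algorithm, asymptotically faster.


-- ===== PORT A =====
-- istidy(n): stringify, sort the digit values, re-join, compare.  Strings are handled as List Char
-- (PySem.Int.toChars = str(n)); int(single char) is PySem.Int.ofChars? — the .getD 0 is only a
-- totalisation guard: istidy is only applied to positive ints, whose characters are all digits.
def pvIstidy (i : Int) : Bool :=
  let s := PySem.Int.toChars i
  let x := PySem.List.sorted (s.map (fun c => (PySem.Int.ofChars? [c]).getD 0)) (fun v => v) false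
  let oc := x.foldl (fun acc v => acc ++ PySem.Int.toChars v) ([] : List Char)
  s == oc

-- the 'while True' loop of A, with a fuel guard (A's loop has none); fuel 10^(n+1) is proven
-- sufficient below (the n-th tidy number has at most n+1 digits), so the 0 branch is never taken on Pre_.
def pvLoopA (n : Int) : Int → Int → Nat → Int
  | _, _, 0 => 0
  | c, i, fuel+1 =>
    if pvIstidy i then
      (if c + 1 = n then i else pvLoopA n (c + 1) (i + 1) fuel)
    else pvLoopA n c (i + 1) fuel

def fun_nth_tidynumber (n : Int) : Int := pvLoopA n (-1) 1 (10 ^ (n.toNat + 1))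

-- ===== PORT B =====
-- _next(r): successor of a tidy number given as its digit list, least-significant first.
-- Python's e[0] is ported as headD 0: _next never returns an empty list.
def pvNext : List Int → List Int
  | [] => [1]
  | x :: r => if x == 9 then (let e := pvNext r; e.headD 0 :: e) else (x + 1) :: r

def fun_nth_tidynumber_alt (n : Int) : Int :=
  let r := (PySem.List.pyRange 0 n 1).foldl (fun r _ => pvNext r) [1]
  (r.reverse).foldl (fun v x => v * 10 + x) 0

-- ===== PRECONDITION & SPEC =====
-- Pre_ excludes exactly the negative n, on which A's 'while True' loop never returns (it counts
-- tidy numbers upward from c = -1 and can never hit a negative target).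
def Pre_fun_nth_tidynumber (n : Int) : Prop := 0 ≤ n
instance (n : Int) : Decidable (Pre_fun_nth_tidynumber n) := by unfold Pre_fun_nth_tidynumber; infer_instance
def pvWitness_fun_nth_tidynumber : Int := 0

def Spec_fun_nth_tidynumber (n : Int) (out : Int) : Prop := out = fun_nth_tidynumber_alt n
instance (n : Int) (out : Int) : Decidable (Spec_fun_nth_tidynumber n out) := by unfold Spec_fun_nth_tidynumber; infer_instance

-- ===== CLAIM (what is proved, stated in full; the proofs are below) =====
def Claim_equal_fun_nth_tidynumber : Prop := ∀ (n : Int), Dom_fun_nth_tidynumber n → Pre_fun_nth_tidynumber n → Spec_fun_nth_tidynumber n (fun_nth_tidynumber n)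

-- ===== LEMMAS AND PROOFS =====

-- value of a least-significant-first digit list
def pvValR : List Int → Int
  | [] => 0
  | x :: r => x + 10 * pvValR r

-- k-fold application of pvNext
def pvIter : Nat → List Int → List Int
  | 0, r => r
  | k+1, r => pvIter k (pvNext r)

-- digit list (least-significant first) of a natural number
def pvDigR (n : Nat) : List Int :=
  if h : n = 0 then [] else ((n % 10 : Nat) : Int) :: pvDigR (n / 10)
decreasing_by exact Nat.div_lt_self (Nat.pos_of_ne_zero h) (by norm_num)

-- a tidy digit list, least-significant first: digits 1..9, non-increasing from the head
def pvDigOk (r : List Int) : Prop :=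
  (∀ x ∈ r, 1 ≤ x ∧ x ≤ 9) ∧ r.Pairwise (fun a b => b ≤ a)

def pvDchar (v : Int) : Char := Nat.digitChar v.toNat
def pvDval (c : Char) : Int := (PySem.Int.ofChars? [c]).getD 0

theorem pvDigOk_tail {x : Int} {r : List Int} (h : pvDigOk (x :: r)) : pvDigOk r := by
  obtain ⟨h1, h2⟩ := h
  exact ⟨fun y hy => h1 y (List.mem_cons_of_mem _ hy), (List.pairwise_cons.mp h2).2⟩

theorem pvHead_max {r : List Int} (h : pvDigOk r) (hne : r ≠ []) :
    ∀ y ∈ r, y ≤ r.headD 0 := by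
  cases r with
  | nil => simp at hne
  | cons a t =>
    intro y hy
    rcases List.mem_cons.mp hy with rfl | hy'
    · simp
    · simpa using (List.pairwise_cons.mp h.2).1 y hy'

theorem pvValR_nonneg {r : List Int} (h : ∀ x ∈ r, 0 ≤ x) : 0 ≤ pvValR r := by
  induction r with
  | nil => simp [pvValR]
  | cons a t ih =>
    have ha := h a (List.mem_cons_self ..)
    have ht := ih (fun x hx => h x (List.mem_cons_of_mem _ hx))
    simp only [pvValR]; omega

theorem pvValR_pos {r : List Int} (h : pvDigOk r) (hne : r ≠ []) : 1 ≤ pvValR r := by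
  cases r with
  | nil => simp at hne
  | cons a t =>
    have ha := h.1 a (List.mem_cons_self ..)
    have ht := pvValR_nonneg (r := t) (fun x hx => (h.1 x (List.mem_cons_of_mem _ hx)).1.trans' (by norm_num))
    simp only [pvValR]; omega

theorem pvValR_lt {r : List Int} (h : ∀ x ∈ r, x ≤ 9) : pvValR r < 10 ^ r.length := by
  induction r with
  | nil => simp [pvValR]
  | cons a t ih =>
    have ha := h a (List.mem_cons_self ..)
    have ht := ih (fun x hx => h x (List.mem_cons_of_mem _ hx))
    simp only [pvValR, List.length_cons, pow_succ]
    nlinarith [ht]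

theorem pvDval_dchar {v : Int} (h0 : 0 ≤ v) (h9 : v ≤ 9) : pvDval (pvDchar v) = v := by
  interval_cases v <;> decide

theorem pvToChars_digit {v : Int} (h0 : 0 ≤ v) (h9 : v ≤ 9) :
    PySem.Int.toChars v = [pvDchar v] := by
  interval_cases v <;> decide

theorem pvToChars_ge10 {i : Int} (h : 10 ≤ i) :
    PySem.Int.toChars i = PySem.Int.toChars (i / 10) ++ [pvDchar (i % 10)] := by
  have h0 : ¬ i < 0 := by omega
  have h0' : ¬ i / 10 < 0 := by omega
  simp only [PySem.Int.toChars, h0, h0', if_false]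
  have hd : (i / 10).toNat = i.toNat / 10 := by omega
  have hm : (i % 10).toNat = i.toNat % 10 := by omega
  rw [hd, pvDchar, hm]
  exact Nat.toDigits_of_base_le (by norm_num) (by omega)

theorem pvToChars_valR {r : List Int} (h : pvDigOk r) (hne : r ≠ []) :
    PySem.Int.toChars (pvValR r) = (r.reverse).map pvDchar := by
  induction r with
  | nil => simp at hne
  | cons x r' ih =>
    obtain ⟨hx1, hx9⟩ := h.1 x (List.mem_cons_self ..)
    cases r' with
    | nil =>
      have hv : pvValR [x] = x := by simp [pvValR]
      rw [hv, pvToChars_digit (by omega) hx9]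
      simp
    | cons y t =>
      have htail : pvDigOk (y :: t) := pvDigOk_tail h
      have hvp : 1 ≤ pvValR (y :: t) := pvValR_pos htail (by simp)
      have hval : pvValR (x :: y :: t) = x + 10 * pvValR (y :: t) := rfl
      have h10 : 10 ≤ pvValR (x :: y :: t) := by omega
      rw [pvToChars_ge10 h10]
      have hd : pvValR (x :: y :: t) / 10 = pvValR (y :: t) := by omega
      have hm : pvValR (x :: y :: t) % 10 = x := by omega
      rw [hd, hm, ih htail (by simp)]
      simp

theorem pvDigR_eq_nil {n : Nat} : pvDigR n = [] ↔ n = 0 := by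
  constructor
  · intro h; by_contra hn; rw [pvDigR] at h; simp [hn] at h
  · intro h; subst h; rw [pvDigR]; simp

theorem pvValR_digR (n : Nat) : pvValR (pvDigR n) = (n : Int) := by
  induction n using Nat.strong_induction_on with
  | _ n ih =>
    rw [pvDigR]
    by_cases h : n = 0
    · simp [h, pvValR]
    · simp only [h, dite_false, pvValR]
      rw [ih (n / 10) (Nat.div_lt_self (Nat.pos_of_ne_zero h) (by norm_num))]
      omega

theorem pvDigR_mem {n : Nat} {x : Int} (hx : x ∈ pvDigR n) : 0 ≤ x ∧ x ≤ 9 := by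
  induction n using Nat.strong_induction_on with
  | _ n ih =>
    rw [pvDigR] at hx
    by_cases h : n = 0
    · simp [h] at hx
    · simp only [h, dite_false, List.mem_cons] at hx
      rcases hx with rfl | hx'
      · constructor <;> omega
      · exact ih (n / 10) (Nat.div_lt_self (Nat.pos_of_ne_zero h) (by norm_num)) hx'

theorem pvDigR_last {n : Nat} {v : Int} (hv : (pvDigR n).getLast? = some v) : 1 ≤ v := by
  induction n using Nat.strong_induction_on with
  | _ n ih =>
    rw [pvDigR] at hv
    by_cases h : n = 0
    · simp [h] at hv
    · simp only [h, dite_false] at hv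
      cases hq : pvDigR (n / 10) with
      | nil =>
        rw [hq] at hv
        have hsmall : n / 10 = 0 := pvDigR_eq_nil.mp hq
        simp only [List.getLast?_singleton, Option.some.injEq] at hv
        subst hv
        omega
      | cons b tl =>
        rw [hq, List.getLast?_cons_cons] at hv
        exact ih (n / 10) (Nat.div_lt_self (Nat.pos_of_ne_zero h) (by norm_num)) (hq ▸ hv)

theorem pvToChars_digR {n : Nat} (h1 : 1 ≤ n) :
    PySem.Int.toChars (n : Int) = ((pvDigR n).reverse).map pvDchar := by
  induction n using Nat.strong_induction_on with
  | _ n ih =>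
    rw [pvDigR]
    have h : n ≠ 0 := by omega
    simp only [h, dite_false]
    by_cases hlt : n < 10
    · have hq : n / 10 = 0 := by omega
      have hm : n % 10 = n := by omega
      rw [hq, hm]
      rw [show pvDigR 0 = [] from pvDigR_eq_nil.mpr rfl]
      rw [pvToChars_digit (by omega) (by omega)]
      simp
    · have h10 : (10 : Int) ≤ (n : Int) := by omega
      rw [pvToChars_ge10 h10]
      have hd : (n : Int) / 10 = ((n / 10 : Nat) : Int) := by omega
      have hm : (n : Int) % 10 = ((n % 10 : Nat) : Int) := by omega
      rw [hd, hm, ih (n / 10) (Nat.div_lt_self (by omega) (by norm_num)) (by omega)]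
      simp

theorem pvMap_dval_dchar {z : List Int} (hz : ∀ x ∈ z, 0 ≤ x ∧ x ≤ 9) :
    (z.map pvDchar).map pvDval = z := by
  rw [List.map_map]
  calc z.map (pvDval ∘ pvDchar) = z.map id :=
        List.map_congr_left (fun x hx => pvDval_dchar (hz x hx).1 (hz x hx).2)
  _ = z := List.map_id z

theorem pvMap_dchar_inj {u w : List Int} (hu : ∀ x ∈ u, 0 ≤ x ∧ x ≤ 9)
    (hw : ∀ x ∈ w, 0 ≤ x ∧ x ≤ 9) (h : u.map pvDchar = w.map pvDchar) : u = w := by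
  rw [← pvMap_dval_dchar hu, ← pvMap_dval_dchar hw, h]

theorem pvFlatMap_digits {z : List Int} (hz : ∀ x ∈ z, 0 ≤ x ∧ x ≤ 9) :
    z.flatMap PySem.Int.toChars = z.map pvDchar := by
  induction z with
  | nil => simp
  | cons a t ih =>
    obtain ⟨h0, h9⟩ := hz a (List.mem_cons_self ..)
    rw [List.flatMap_cons, List.map_cons, pvToChars_digit h0 h9,
      ih (fun x hx => hz x (List.mem_cons_of_mem _ hx))]
    rfl

theorem pvIstidy_valR {r : List Int} (h : pvDigOk r) (hne : r ≠ []) :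
    pvIstidy (pvValR r) = true := by
  have hmem : ∀ x ∈ r.reverse, 0 ≤ x ∧ x ≤ 9 := by
    intro x hx
    have := h.1 x (List.mem_reverse.mp hx)
    omega
  simp only [pvIstidy]
  rw [pvToChars_valR h hne]
  rw [show (fun c => (PySem.Int.ofChars? [c]).getD 0) = pvDval from rfl]
  rw [pvMap_dval_dchar hmem]
  have hpw : List.Pairwise (fun a b => (fun v => v) a ≤ (fun v => v) b) r.reverse :=
    List.pairwise_reverse.mpr h.2
  rw [PySem.List.sorted_eq_self_of_pairwise _ _ hpw]
  rw [PySem.List.foldl_append_eq_flatMap, pvFlatMap_digits hmem]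
  simp

theorem pvIstidy_parse {m : Int} (h1 : 1 ≤ m) (h : pvIstidy m = true) :
    pvDigOk (pvDigR m.toNat) ∧ pvValR (pvDigR m.toNat) = m := by
  have hN : ((m.toNat : Nat) : Int) = m := by omega
  have hval : pvValR (pvDigR m.toNat) = m := by rw [pvValR_digR]; omega
  set u := (pvDigR m.toNat).reverse with hu_def
  have hu : ∀ x ∈ u, 0 ≤ x ∧ x ≤ 9 := fun x hx => pvDigR_mem (List.mem_reverse.mp hx)
  have hs : PySem.Int.toChars m = u.map pvDchar := by
    rw [← hN, pvToChars_digR (by omega)]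
  simp only [pvIstidy, hs] at h
  rw [show (fun c => (PySem.Int.ofChars? [c]).getD 0) = pvDval from rfl] at h
  rw [pvMap_dval_dchar hu] at h
  rw [PySem.List.foldl_append_eq_flatMap] at h
  have hsmem : ∀ x ∈ PySem.List.sorted u (fun v => v) false, 0 ≤ x ∧ x ≤ 9 :=
    fun x hx => hu x ((PySem.List.mem_sorted ..).mp hx)
  rw [pvFlatMap_digits hsmem, List.nil_append, beq_iff_eq] at h
  have husort : u = PySem.List.sorted u (fun v => v) false := pvMap_dchar_inj hu hsmem h
  have hpw : List.Pairwise (fun a b : Int => a ≤ b) u := by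
    have := PySem.List.sorted_pairwise u (fun v => v)
    rw [← husort] at this
    exact this
  have hne : pvDigR m.toNat ≠ [] := by
    intro hnil
    rw [hnil] at hval
    simp [pvValR] at hval
    omega
  have hpw' : (pvDigR m.toNat).Pairwise (fun a b => b ≤ a) := by
    rw [← List.pairwise_reverse]
    exact hpw
  refine ⟨⟨?_, hpw'⟩, hval⟩
  cases hc : u with
  | nil =>
    rw [hu_def] at hc
    exact absurd (List.reverse_eq_nil_iff.mp hc) hne
  | cons a t =>
    have ha1 : 1 ≤ a := by
      have hgl : (pvDigR m.toNat).getLast? = some a := by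
        rw [← List.head?_reverse, ← hu_def, hc]; rfl
      exact pvDigR_last hgl
    intro x hx
    have hxu : x ∈ u := by rw [hu_def]; exact List.mem_reverse.mpr hx
    have hax : a ≤ x := by
      rw [hc] at hxu
      rcases List.mem_cons.mp hxu with rfl | hxt
      · exact le_refl x
      · exact (List.pairwise_cons.mp (hc ▸ hpw)).1 x hxt
    have := hu x hxu
    omega

theorem pvNext_ok {r : List Int} (h : pvDigOk r) :
    pvNext r ≠ [] ∧ pvDigOk (pvNext r) := by
  induction r with
  | nil =>
    refine ⟨by simp [pvNext], ⟨?_, ?_⟩⟩ <;> simp [pvNext]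
  | cons x r' ih =>
    obtain ⟨hx1, hx9⟩ := h.1 x (List.mem_cons_self ..)
    have htail := pvDigOk_tail h
    by_cases hx : x = 9
    · simp only [pvNext, hx, beq_self_eq_true, if_true]
      obtain ⟨hne', hok'⟩ := ih htail
      have hhead : (pvNext r').headD 0 ∈ pvNext r' := by
        cases hq : pvNext r' with
        | nil => exact absurd hq hne'
        | cons a t => simp
      refine ⟨by simp, ⟨?_, ?_⟩⟩
      · intro z hz
        rcases List.mem_cons.mp hz with rfl | hz'
        · exact hok'.1 _ hhead
        · exact hok'.1 z hz'
      · rw [List.pairwise_cons]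
        exact ⟨pvHead_max hok' hne', hok'.2⟩
    · have hbx : (x == 9) = false := by simp [hx]
      simp only [pvNext, hbx, Bool.false_eq_true, if_false]
      refine ⟨by simp, ⟨?_, ?_⟩⟩
      · intro z hz
        rcases List.mem_cons.mp hz with rfl | hz'
        · omega
        · exact htail.1 z hz'
      · rw [List.pairwise_cons]
        refine ⟨fun y hy => ?_, htail.2⟩
        have := (List.pairwise_cons.mp h.2).1 y hy
        omega

theorem pvNext_headD_mem {r : List Int} (h : pvDigOk r) : (pvNext r).headD 0 ∈ pvNext r := by
  obtain ⟨hne, _⟩ := pvNext_ok h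
  cases hq : pvNext r with
  | nil => exact absurd hq hne
  | cons a t => simp

theorem pvValR_next_gt {r : List Int} (h : pvDigOk r) : pvValR r < pvValR (pvNext r) := by
  induction r with
  | nil => simp [pvNext, pvValR]
  | cons x r' ih =>
    have htail := pvDigOk_tail h
    by_cases hx : x = 9
    · simp only [pvNext, hx, beq_self_eq_true, if_true]
      have hih := ih htail
      have hh := (pvNext_ok htail).2.1 _ (pvNext_headD_mem htail)
      simp only [pvValR]
      omega
    · have hbx : (x == 9) = false := by simp [hx]
      simp only [pvNext, hbx, Bool.false_eq_true, if_false, pvValR]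
      omega

theorem pvValR_inj {a b : List Int} (ha : pvDigOk a) (hb : pvDigOk b)
    (h : pvValR a = pvValR b) : a = b := by
  induction a generalizing b with
  | nil =>
    cases b with
    | nil => rfl
    | cons y b' =>
      have hp := pvValR_pos hb (by simp)
      simp only [pvValR] at h hp
      omega
  | cons x a' ih =>
    cases b with
    | nil =>
      have hp := pvValR_pos ha (by simp)
      simp only [pvValR] at h hp
      omega
    | cons y b' =>
      obtain ⟨hx1, hx9⟩ := ha.1 x (List.mem_cons_self ..)
      obtain ⟨hy1, hy9⟩ := hb.1 y (List.mem_cons_self ..)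
      have hva := pvValR_nonneg (r := a') (fun z hz => by have := (pvDigOk_tail ha).1 z hz; omega)
      have hvb := pvValR_nonneg (r := b') (fun z hz => by have := (pvDigOk_tail hb).1 z hz; omega)
      simp only [pvValR] at h
      have hxy : x = y ∧ pvValR a' = pvValR b' := by omega
      rw [hxy.1, ih (pvDigOk_tail ha) (pvDigOk_tail hb) hxy.2]

theorem pvNext_min {e r : List Int} (he : pvDigOk e) (hr : pvDigOk r)
    (h : pvValR r < pvValR e) : pvValR (pvNext r) ≤ pvValR e := by
  induction r generalizing e with
  | nil =>
    have hene : e ≠ [] := by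
      intro hnil; rw [hnil] at h; simp [pvValR] at h
    have := pvValR_pos he hene
    simp only [pvNext, pvValR]
    omega
  | cons x r' ih =>
    have htail := pvDigOk_tail hr
    obtain ⟨hx1, hx9⟩ := hr.1 x (List.mem_cons_self ..)
    have hvr' := pvValR_nonneg (r := r') (fun z hz => by have := htail.1 z hz; omega)
    cases e with
    | nil => simp only [pvValR] at h; omega
    | cons y e' =>
      have hetail := pvDigOk_tail he
      obtain ⟨hy1, hy9⟩ := he.1 y (List.mem_cons_self ..)
      have hve' := pvValR_nonneg (r := e') (fun z hz => by have := hetail.1 z hz; omega)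
      simp only [pvValR] at h ⊢
      by_cases hx : x = 9
      · subst hx
        simp only [pvNext, beq_self_eq_true, if_true, pvValR]
        have hgt : pvValR r' < pvValR e' := by omega
        have hene' : e' ≠ [] := by
          intro hnil; rw [hnil] at hgt; simp [pvValR] at hgt; omega
        have hih := ih hetail htail hgt
        have hh9 : (pvNext r').headD 0 ≤ 9 ∧ 1 ≤ (pvNext r').headD 0 := by
          have := (pvNext_ok htail).2.1 _ (pvNext_headD_mem htail)
          omega
        rcases lt_or_eq_of_le hih with hlt | heq
        · omega
        · have : pvNext r' = e' := pvValR_inj (pvNext_ok htail).2 hetail heq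
          rw [this]
          have hyh : (e' : List Int).headD 0 ≤ y := by
            cases hq : e' with
            | nil => exact absurd hq hene'
            | cons a t =>
              have := (List.pairwise_cons.mp he.2).1 a (by rw [hq]; exact List.mem_cons_self ..)
              simpa using this
          omega
      · have hbx : (x == 9) = false := by simp [hx]
        simp only [pvNext, hbx, Bool.false_eq_true, if_false, pvValR]
        rcases lt_trichotomy (pvValR e') (pvValR r') with hlt | heq | hgt
        · omega
        · omega
        · omega

theorem pvIstidy_false_between {r : List Int} {t : Int} (h : pvDigOk r) (hne : r ≠ [])
    (h1 : pvValR r < t) (h2 : t < pvValR (pvNext r)) : pvIstidy t = false := by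
  by_contra hcon
  have htrue : pvIstidy t = true := by
    cases hq : pvIstidy t
    · exact absurd hq hcon
    · rfl
  have hrv := pvValR_pos h hne
  obtain ⟨hok, hval⟩ := pvIstidy_parse (by omega) htrue
  have := pvNext_min hok h (by omega)
  omega

theorem pvLength_next {r : List Int} : (pvNext r).length ≤ r.length + 1 := by
  induction r with
  | nil => simp [pvNext]
  | cons x r' ih =>
    by_cases hx : x = 9
    · simp only [pvNext, hx, beq_self_eq_true, if_true, List.length_cons]
      omega
    · have hbx : (x == 9) = false := by simp [hx]
      simp [pvNext, hbx]

theorem pvIter_ok {r : List Int} (k : Nat) (h : pvDigOk r) (hne : r ≠ []) :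
    pvDigOk (pvIter k r) ∧ pvIter k r ≠ [] := by
  induction k generalizing r with
  | zero => exact ⟨h, hne⟩
  | succ k ih =>
    obtain ⟨hne', hok'⟩ := pvNext_ok h
    exact ih hok' hne'

theorem pvValR_le_iter {r : List Int} (k : Nat) (h : pvDigOk r) (hne : r ≠ []) :
    pvValR r ≤ pvValR (pvIter k r) := by
  induction k generalizing r with
  | zero => exact le_refl _
  | succ k ih =>
    obtain ⟨hne', hok'⟩ := pvNext_ok h
    exact le_trans (le_of_lt (pvValR_next_gt h)) (ih hok' hne')

theorem pvLength_iter {r : List Int} (k : Nat) : (pvIter k r).length ≤ r.length + k := by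
  induction k generalizing r with
  | zero => simp [pvIter]
  | succ k ih =>
    calc (pvIter k (pvNext r)).length ≤ (pvNext r).length + k := ih
    _ ≤ r.length + (k + 1) := by have := pvLength_next (r := r); omega

theorem pvWalk (m : Nat) : ∀ (n c j : Int) (fuel : Nat),
    (∀ t : Int, j ≤ t → t < j + m → pvIstidy t = false) → m ≤ fuel →
    pvLoopA n c j fuel = pvLoopA n c (j + m) (fuel - m) := by
  induction m with
  | zero => intro n c j fuel _ _; simp
  | succ m ih =>
    intro n c j fuel hfalse hfuel
    cases fuel with
    | zero => omega
    | succ f =>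
      have hj : pvIstidy j = false := hfalse j le_rfl (by push_cast; omega)
      simp only [pvLoopA, hj, Bool.false_eq_true, if_false]
      rw [ih n c (j+1) f (fun t ht1 ht2 => hfalse t (by omega) (by push_cast at ht2 ⊢; omega))
        (by omega)]
      have h1 : j + 1 + (m : Int) = j + ((m + 1 : Nat) : Int) := by push_cast; ring
      rw [h1]
      congr 1
      omega

theorem pvLoop_eq (k : Nat) : ∀ (r : List Int) (c n : Int) (fuel : Nat),
    pvDigOk r → r ≠ [] → n = c + 1 + k →
    (pvValR (pvIter k r) - pvValR r).toNat + 1 ≤ fuel →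
    pvLoopA n c (pvValR r) fuel = pvValR (pvIter k r) := by
  induction k with
  | zero =>
    intro r c n fuel hok hne hn hfuel
    have hit : pvIter 0 r = r := rfl
    rw [hit] at hfuel ⊢
    cases fuel with
    | zero => omega
    | succ f =>
      simp only [pvLoopA]
      rw [if_pos (pvIstidy_valR hok hne)]
      have hc : c + 1 = n := by push_cast at hn; omega
      simp [hc]
  | succ k ih =>
    intro r c n fuel hok hne hn hfuel
    obtain ⟨hne', hok'⟩ := pvNext_ok hok
    have hgt := pvValR_next_gt hok
    have hmono := pvValR_le_iter k hok' hne'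
    have hiter : pvIter (k+1) r = pvIter k (pvNext r) := rfl
    rw [hiter] at hfuel ⊢
    cases fuel with
    | zero => omega
    | succ f =>
      simp only [pvLoopA]
      rw [if_pos (pvIstidy_valR hok hne)]
      have hcn : ¬ (c + 1 = n) := by push_cast at hn; omega
      rw [if_neg hcn]
      set m := (pvValR (pvNext r) - (pvValR r + 1)).toNat with hm
      have hmle : m ≤ f := by omega
      have hfal : ∀ t : Int, pvValR r + 1 ≤ t → t < pvValR r + 1 + m → pvIstidy t = false := by
        intro t ht1 ht2
        exact pvIstidy_false_between hok hne (by omega) (by omega)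
      rw [pvWalk m n (c+1) (pvValR r + 1) f hfal hmle]
      have harg : pvValR r + 1 + (m : Int) = pvValR (pvNext r) := by omega
      rw [harg]
      exact ih (pvNext r) (c+1) n (f - m) hok' hne' (by push_cast at hn ⊢; omega) (by omega)

theorem pvFoldl_const_iter (l : List Int) : ∀ (s : List Int),
    l.foldl (fun r _ => pvNext r) s = pvIter l.length s := by
  induction l with
  | nil => intro s; simp [pvIter]
  | cons a t ih => intro s; simpa [pvIter] using ih (pvNext s)

theorem pvValR_eq_foldr (r : List Int) : r.foldr (fun x v => v * 10 + x) 0 = pvValR r := by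
  induction r with
  | nil => simp [pvValR]
  | cons a t ih => simp only [List.foldr_cons, pvValR, ih]; ring

-- ===== VERDICT (by name: the statement is the Claim_ definition above) =====
theorem fun_nth_tidynumber_spec : Claim_equal_fun_nth_tidynumber := by
  intro n _ hpre
  unfold Spec_fun_nth_tidynumber
  have hpre' : 0 ≤ n := hpre
  have hok1 : pvDigOk [1] := by
    refine ⟨?_, by simp⟩
    intro x hx
    simp at hx
    omega
  have hne1 : ([1] : List Int) ≠ [] := by simp
  have hv1 : pvValR [1] = 1 := by simp [pvValR]
  have hB : fun_nth_tidynumber_alt n = pvValR (pvIter n.toNat [1]) := by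
    rw [show fun_nth_tidynumber_alt n
        = (((PySem.List.pyRange 0 n 1).foldl (fun r _ => pvNext r) [1]).reverse).foldl
            (fun v x => v * 10 + x) 0 from rfl]
    rw [pvFoldl_const_iter, PySem.List.length_pyRange_one, List.foldl_reverse, pvValR_eq_foldr]
    have : (n - 0).toNat = n.toNat := by omega
    rw [this]
  have hdig : ∀ x ∈ pvIter n.toNat [1], x ≤ 9 :=
    fun x hx => ((pvIter_ok n.toNat hok1 hne1).1.1 x hx).2
  have hlt := pvValR_lt hdig
  have hlen := pvLength_iter (r := ([1] : List Int)) n.toNat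
  have hpow : (10 : Int) ^ (pvIter n.toNat [1]).length ≤ (10 : Int) ^ (n.toNat + 1) := by
    apply pow_le_pow_right₀ (by norm_num)
    simp only [List.length_singleton] at hlen
    omega
  have hV : pvValR (pvIter n.toNat [1]) < ((10 ^ (n.toNat + 1) : Nat) : Int) := by
    have hcast : ((10 ^ (n.toNat + 1) : Nat) : Int) = (10 : Int) ^ (n.toNat + 1) := by push_cast; rfl
    rw [hcast]
    exact lt_of_lt_of_le hlt hpow
  have hfuel : (pvValR (pvIter n.toNat [1]) - pvValR [1]).toNat + 1 ≤ 10 ^ (n.toNat + 1) := by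
    rw [hv1]
    have hge1 : 1 ≤ pvValR (pvIter n.toNat [1]) := by
      have h := pvValR_le_iter n.toNat hok1 hne1
      rw [hv1] at h
      exact h
    apply (Nat.cast_le (α := Int)).mp
    push_cast [Int.toNat_of_nonneg (by omega : (0:Int) ≤ pvValR (pvIter n.toNat [1]) - 1)] at hV ⊢
    omega
  have hA := pvLoop_eq n.toNat [1] (-1) n (10 ^ (n.toNat + 1)) hok1 hne1 (by omega) hfuel
  rw [hv1] at hA
  rw [show fun_nth_tidynumber n = pvLoopA n (-1) 1 (10 ^ (n.toNat + 1)) from rfl]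
  rw [hA, hB]
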